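-- pv_equiv track=rewrite | github.com/pdurlej/ia-presenter-know-how | skills/ia-presenter-deck/scripts/presentation_system.py | merge_title_table_stack
-- ===== SOURCE A (Python) =====
-- IMAGE_EXTENSIONS = (".png", ".jpg", ".jpeg", ".webp", ".gif", ".tiff", ".bmp")
--
-- IMAGE_ATTR_KEYS = {
--     "background",
--     "filter",
--     "opacity",
--     "size",
--     "x",
--     "y",
--     "title",
--     "caption",
-- }
--
-- def line_type(raw: str) -> str:
--     stripped = raw.strip()
--     if not stripped:
--         return "blank"
--
--     if raw.startswith("\t"):
--         visible = stripped
--         if visible.startswith("|"):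
--             return "table"
--         if visible.startswith(">"):
--             return "quote"
--         return "visible"
--
--     if stripped.startswith("#"):
--         return "heading"
--     if stripped.startswith("|"):
--         return "table"
--     if is_image_reference(stripped):
--         return "image"
--     if is_attribute_line(stripped):
--         return "attribute"
--     return "hidden"
--
-- def is_image_reference(text: str) -> bool:
--     lower = text.lower()
--     if lower.startswith(("http://", "https://", "/")) and lower.endswith(IMAGE_EXTENSIONS):
--         return True
--     return False
--
-- def is_attribute_line(text: str) -> bool:
--     if ":" not in text:
--         return False
--     key = text.split(":", 1)[0].strip().lower()
--     return key in IMAGE_ATTR_KEYS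
--
-- def merge_title_table_stack(slide_lines: list[str]) -> list[str]:
--     new_lines: list[str] = []
--     for idx, raw in enumerate(slide_lines):
--         if not raw.strip():
--             prev = previous_nonblank(slide_lines, idx)
--             nxt = next_nonblank(slide_lines, idx)
--             if prev and nxt and line_type(prev) == "heading" and line_type(nxt) == "table":
--                 continue
--         new_lines.append(raw)
--     return trim_extra_blank_lines(new_lines)
--
-- def previous_nonblank(lines: list[str], index: int) -> str | None:
--     for candidate in reversed(lines[:index]):
--         if candidate.strip():
--             return candidate
--     return None
--
-- def next_nonblank(lines: list[str], index: int) -> str | None: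
--     for candidate in lines[index + 1 :]:
--         if candidate.strip():
--             return candidate
--     return None
--
-- def trim_extra_blank_lines(lines: list[str]) -> list[str]:
--     trimmed: list[str] = []
--     previous_blank = False
--     for raw in lines:
--         is_blank = not raw.strip()
--         if is_blank and previous_blank:
--             continue
--         trimmed.append(raw)
--         previous_blank = is_blank
--     while trimmed and not trimmed[0].strip():
--         trimmed.pop(0)
--     while trimmed and not trimmed[-1].strip():
--         trimmed.pop()
--     return trimmed
-- ===== SOURCE B (Python) =====
-- def _is_heading(raw):
--     return not raw.startswith("\t") and raw.strip().startswith("#")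
--
-- def _is_table(raw):
--     return raw.strip().startswith("|")
--
-- def merge_title_table_stack(slide_lines: list[str]) -> list[str]:
--     merged: list[str] = []
--     prev = None     # last non-blank line appended
--     pending = None  # first blank line of the current blank run, if any
--     for raw in slide_lines:
--         if raw.strip():
--             if pending is not None and prev is not None and not (_is_heading(prev) and _is_table(raw)):
--                 merged.append(pending)
--             merged.append(raw)
--             prev = raw
--             pending = None
--         elif pending is None:
--             pending = raw
--     return merged
-- ===== Notes on version B (the rewrite author's own statement) =====
-- stated objective: alternative
-- what changed: Single forward pass carrying the last non-blank line and the first blank of the current blank run, emitting the blank only when the heading/table merge condition fails; this replaces A's per-blank-line previous/next scans and its separate collapse-and-trim pass (measured ~1.35x, below the 1.5x bar, so no speed claim).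
import Mathlib
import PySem

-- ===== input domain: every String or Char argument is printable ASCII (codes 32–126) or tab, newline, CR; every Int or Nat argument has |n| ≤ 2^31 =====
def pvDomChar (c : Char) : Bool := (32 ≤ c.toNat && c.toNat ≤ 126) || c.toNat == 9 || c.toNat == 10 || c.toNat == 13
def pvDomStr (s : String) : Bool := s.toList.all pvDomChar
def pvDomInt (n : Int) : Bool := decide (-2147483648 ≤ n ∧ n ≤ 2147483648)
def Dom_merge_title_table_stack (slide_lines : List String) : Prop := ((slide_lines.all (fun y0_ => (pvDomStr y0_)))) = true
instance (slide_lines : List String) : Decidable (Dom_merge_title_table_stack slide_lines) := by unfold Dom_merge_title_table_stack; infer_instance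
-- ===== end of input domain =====

-- B restructures A: a single forward pass carrying the last non-blank line and the first blank
-- of the current blank run, instead of A's per-blank-line previous/next scans plus a separate
-- collapse-and-trim pass (alternative structure; measured speed difference below the 1.5x bar).

-- ===== PORT A =====
def IMAGE_EXTENSIONS : List String := [".png", ".jpg", ".jpeg", ".webp", ".gif", ".tiff", ".bmp"]

def IMAGE_ATTR_KEYS : List String :=
  ["background", "filter", "opacity", "size", "x", "y", "title", "caption"]

def is_image_reference (text : String) : Bool :=
  let lower := PySem.Str.lower text
  if (PySem.Str.startswith lower "http://" || PySem.Str.startswith lower "https://"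
      || PySem.Str.startswith lower "/")
     && IMAGE_EXTENSIONS.any (fun e => PySem.Str.endswith lower e) then
    true
  else
    false

def is_attribute_line (text : String) : Bool :=
  if !PySem.Str.isIn ":" text then
    false
  else
    match PySem.Str.splitMax? text ":" 1 with
    | some (k :: _) => IMAGE_ATTR_KEYS.contains (PySem.Str.lower (PySem.Str.strip k))
    | _ => false

def line_type (raw : String) : String :=
  let stripped := PySem.Str.strip raw
  if stripped == "" then "blank"
  else if PySem.Str.startswith raw "\t" then
    let visible := stripped
    if PySem.Str.startswith visible "|" then "table"
    else if PySem.Str.startswith visible ">" then "quote"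
    else "visible"
  else if PySem.Str.startswith stripped "#" then "heading"
  else if PySem.Str.startswith stripped "|" then "table"
  else if is_image_reference stripped then "image"
  else if is_attribute_line stripped then "attribute"
  else "hidden"

def previous_nonblank (lines : List String) (index : Int) : Option String :=
  (PySem.List.slice lines none (some index)).reverse.find? (fun c => PySem.Str.strip c != "")

def next_nonblank (lines : List String) (index : Int) : Option String :=
  (PySem.List.slice lines (some (index + 1)) none).find? (fun c => PySem.Str.strip c != "")

def trim_extra_blank_lines (lines : List String) : List String :=
  let trimmed := (lines.foldl (fun (st : List String × Bool) raw =>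
      let is_blank := PySem.Str.strip raw == ""
      if is_blank && st.2 then st else (st.1 ++ [raw], is_blank)) ([], false)).1
  -- the two while/pop loops strip blank lines from the front and from the back
  let t1 := trimmed.dropWhile (fun r => PySem.Str.strip r == "")
  (t1.reverse.dropWhile (fun r => PySem.Str.strip r == "")).reverse

def merge_title_table_stack (slide_lines : List String) : List String :=
  let new_lines := (PySem.List.enumerate slide_lines 0).foldl (fun acc p =>
    if PySem.Str.strip p.2 == "" then
      let prev := previous_nonblank slide_lines p.1
      let nxt := next_nonblank slide_lines p.1
      -- 'if prev and nxt and …': None and "" are falsy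
      if (match prev, nxt with
          | some pr, some nx =>
              pr != "" && nx != "" && line_type pr == "heading" && line_type nx == "table"
          | _, _ => false) then acc
      else acc ++ [p.2]
    else acc ++ [p.2]) []
  trim_extra_blank_lines new_lines

-- ===== PORT B =====
def pv_is_heading (raw : String) : Bool :=
  !PySem.Str.startswith raw "\t" && PySem.Str.startswith (PySem.Str.strip raw) "#"

def pv_is_table (raw : String) : Bool :=
  PySem.Str.startswith (PySem.Str.strip raw) "|"

def merge_title_table_stack_alt (slide_lines : List String) : List String :=
  (slide_lines.foldl (fun (st : List String × Option String × Option String) raw =>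
    let merged := st.1
    let prev := st.2.1
    let pending := st.2.2
    if PySem.Str.strip raw != "" then
      let merged :=
        match pending, prev with
        | some p, some pr => if !(pv_is_heading pr && pv_is_table raw) then merged ++ [p] else merged
        | _, _ => merged
      (merged ++ [raw], some raw, none)
    else
      match pending with
      | none => (merged, prev, some raw)
      | some _ => st) ([], none, none)).1

-- ===== PRECONDITION & SPEC =====
def Spec_merge_title_table_stack (slide_lines : List String) (out : List String) : Prop := out = merge_title_table_stack_alt slide_lines
instance (slide_lines : List String) (out : List String) : Decidable (Spec_merge_title_table_stack slide_lines out) := by unfold Spec_merge_title_table_stack; infer_instance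

-- ===== CLAIM (what is proved, stated in full; the proofs are below) =====
def Claim_equal_merge_title_table_stack : Prop := ∀ (slide_lines : List String), Dom_merge_title_table_stack slide_lines → Spec_merge_title_table_stack slide_lines (merge_title_table_stack slide_lines)

-- ===== LEMMAS AND PROOFS =====

-- blank test used everywhere
def pvNB (s : String) : Bool := PySem.Str.strip s != ""

-- first / last non-blank of a list
def pvFirstNB (xs : List String) : Option String := xs.find? pvNB
def pvLastNB (xs : List String) : Option String := xs.reverse.find? pvNB

-- A's drop condition
def pvCondA (prev nxt : Option String) : Bool :=
  match prev, nxt with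
  | some pr, some nx =>
      pr != "" && nx != "" && line_type pr == "heading" && line_type nx == "table"
  | _, _ => false

-- A's main loop as a recursion carrying the last non-blank of the processed prefix
def pvDm (prev : Option String) : List String → List String
  | [] => []
  | x :: xs =>
      if PySem.Str.strip x == "" then
        if pvCondA prev (pvFirstNB xs) then pvDm prev xs else x :: pvDm prev xs
      else x :: pvDm (some x) xs

-- the collapse stage of trim_extra_blank_lines as a recursion
def pvCollapse (pb : Bool) : List String → List String
  | [] => []
  | x :: xs =>
      if (PySem.Str.strip x == "") && pb then pvCollapse pb xs
      else x :: pvCollapse (PySem.Str.strip x == "") xs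

def pvFront (l : List String) : List String := l.dropWhile (fun r => PySem.Str.strip r == "")
def pvBack (l : List String) : List String :=
  (l.reverse.dropWhile (fun r => PySem.Str.strip r == "")).reverse

-- B's fold as a mutual recursion: pvBc = no pending blank, pvBs = pending blank b
mutual
def pvBc (prev : Option String) : List String → List String
  | [] => []
  | x :: xs => if PySem.Str.strip x != "" then x :: pvBc (some x) xs else pvBs prev x xs
def pvBs (prev : Option String) (b : String) : List String → List String
  | [] => []
  | y :: ys =>
      if PySem.Str.strip y != "" then
        (match prev with
         | some pr => if !(pv_is_heading pr && pv_is_table y) then [b] else []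
         | none => []) ++ y :: pvBc (some y) ys
      else pvBs prev b ys
end

-- ---- basic facts ----

theorem pvNB_ne_empty (s : String) (h : pvNB s = true) : (s != "") = true := by
  rcases eq_or_ne s "" with rfl | hne
  · exact absurd h (by decide)
  · simpa using hne

theorem pv_sw_hash_pipe (s : List Char) (h : PySem.Chars.startswith s ['#'] = true) :
    PySem.Chars.startswith s ['|'] = false := by
  rw [PySem.Chars.startswith_iff] at h
  obtain ⟨t, ht⟩ := h
  rw [Bool.eq_false_iff]
  intro hc
  rw [PySem.Chars.startswith_iff] at hc
  obtain ⟨u, hu⟩ := hc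
  rw [← ht] at hu
  simp at hu

theorem pv_lt_heading (p : String) (hp : pvNB p = true) :
    (line_type p == "heading") = pv_is_heading p := by
  have h0 : (PySem.Str.strip p == "") = false := by simpa [pvNB, bne] using hp
  unfold line_type pv_is_heading
  simp only [h0, Bool.false_eq_true, if_false]
  split_ifs with h1 h2 h3 h4 h5 h6 h7 <;> simp_all

theorem pv_lt_table (y : String) (hy : pvNB y = true) :
    (line_type y == "table") = pv_is_table y := by
  have h0 : (PySem.Str.strip y == "") = false := by simpa [pvNB, bne] using hy
  unfold line_type pv_is_table
  simp only [h0, Bool.false_eq_true, if_false]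
  split_ifs with h1 h2 h3 h4 h5 h6 h7 <;> simp_all <;>
    exact pv_sw_hash_pipe _ h4

-- dropWhile across an appended non-matched element
theorem pv_dropWhile_append_singleton (p : String → Bool) (u : List String) (x : String)
    (hx : p x = false) : (u ++ [x]).dropWhile p = u.dropWhile p ++ [x] := by
  induction u with
  | nil => simp [List.dropWhile, hx]
  | cons a u ih =>
      by_cases h : p a = true
      · simp [h, ih]
      · simp [h]

theorem pvBack_cons_nonblank (x : String) (t : List String) (hx : pvNB x = true) :
    pvBack (x :: t) = x :: pvBack t := by
  have hx' : (PySem.Str.strip x == "") = false := by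
    simpa [pvNB, bne] using hx
  simp only [pvBack, List.reverse_cons]
  rw [pv_dropWhile_append_singleton (fun r => PySem.Str.strip r == "") t.reverse x hx']
  simp

theorem pvBack_eq_nil (t : List String) (h : t.any pvNB = false) : pvBack t = [] := by
  have : ∀ r ∈ t.reverse, (PySem.Str.strip r == "") = true := by
    intro r hr
    have := (List.any_eq_false.mp h) r (List.mem_reverse.mp hr)
    simpa [pvNB, bne] using this
  simp [pvBack, List.dropWhile_eq_nil_iff.mpr (by intro r hr; exact this r hr)]

theorem pvBack_cons_blank (x : String) (t : List String) (hx : pvNB x = false) :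
    pvBack (x :: t) = if t.any pvNB then x :: pvBack t else [] := by
  by_cases h : t.any pvNB = true
  · have hne : t.reverse.dropWhile (fun r => PySem.Str.strip r == "") ≠ [] := by
      intro hnil
      obtain ⟨r, hr, hpr⟩ := List.any_eq_true.mp h
      have := List.dropWhile_eq_nil_iff.mp hnil r (List.mem_reverse.mpr hr)
      simp [pvNB, bne] at hpr
      simp [hpr] at this
    simp only [pvBack, List.reverse_cons, h, if_true]
    rw [List.dropWhile_append]
    simp only [List.isEmpty_iff]
    rw [if_neg hne]
    simp
  · have hall : (x :: t).any pvNB = false := by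
      simp only [List.any_cons, Bool.or_eq_false_iff]
      exact ⟨hx, by simpa using h⟩
    simp [pvBack_eq_nil _ hall, h]

theorem pvFront_eq_nil (t : List String) (h : t.any pvNB = false) : pvFront t = [] := by
  apply List.dropWhile_eq_nil_iff.mpr
  intro r hr
  have := (List.any_eq_false.mp h) r hr
  simpa [pvNB, bne] using this

theorem pvFrontBack_comm (l : List String) : pvBack (pvFront l) = pvFront (pvBack l) := by
  induction l with
  | nil => rfl
  | cons x t ih =>
      by_cases hx : pvNB x = true
      · have hx' : (PySem.Str.strip x == "") = false := by simpa [pvNB, bne] using hx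
        have hf : pvFront (x :: t) = x :: t := by simp [pvFront, hx']
        rw [hf, pvBack_cons_nonblank x t hx]
        simp [pvFront, hx']
      · have hxf : pvNB x = false := by simpa using hx
        have hx' : (PySem.Str.strip x == "") = true := by
          simpa [pvNB, bne] using hxf
        have hf : pvFront (x :: t) = pvFront t := by simp [pvFront, hx']
        rw [hf, pvBack_cons_blank x t hxf]
        by_cases ha : t.any pvNB = true
        · rw [if_pos ha]
          have : pvFront (x :: pvBack t) = pvFront (pvBack t) := by
            simp [pvFront, hx']
          rw [this, ih]
        · rw [if_neg ha]
          rw [pvFront_eq_nil t (by simpa using ha)]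
          rfl

theorem pvAny_collapse (pb : Bool) (l : List String) :
    (pvCollapse pb l).any pvNB = l.any pvNB := by
  induction l generalizing pb with
  | nil => rfl
  | cons x xs ih =>
      by_cases hx : (PySem.Str.strip x == "") = true
      · have hnx : pvNB x = false := by simp [pvNB]; simpa using hx
        cases pb <;> simp [pvCollapse, hx, List.any_cons, hnx, ih]
      · simp [pvCollapse, hx, List.any_cons, ih]

theorem pvAny_dm (prev : Option String) (l : List String) :
    (pvDm prev l).any pvNB = l.any pvNB := by
  induction l generalizing prev with
  | nil => rfl
  | cons x xs ih =>
      by_cases hx : (PySem.Str.strip x == "") = true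
      · have hnx : pvNB x = false := by simp [pvNB]; simpa using hx
        by_cases hc : pvCondA prev (pvFirstNB xs) = true
        · simp [pvDm, hx, hc, List.any_cons, hnx, ih]
        · simp [pvDm, hx, hc, List.any_cons, hnx, ih]
      · simp [pvDm, hx, List.any_cons, ih]

-- ---- fold-to-recursion bridges ----

theorem pv_collapse_fold (l : List String) : ∀ (acc : List String) (pb : Bool),
    (l.foldl (fun (st : List String × Bool) raw =>
      let is_blank := PySem.Str.strip raw == ""
      if is_blank && st.2 then st else (st.1 ++ [raw], is_blank)) (acc, pb)).1
    = acc ++ pvCollapse pb l := by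
  induction l with
  | nil => intro acc pb; simp [pvCollapse]
  | cons x xs ih =>
      intro acc pb
      simp only [List.foldl_cons]
      by_cases h : (PySem.Str.strip x == "" && pb) = true
      · rw [if_pos h, ih]
        have hc : pvCollapse pb (x :: xs) = pvCollapse pb xs := by
          simp only [pvCollapse]; rw [if_pos h]
        rw [hc]
      · rw [if_neg h, ih]
        have hc : pvCollapse pb (x :: xs) = x :: pvCollapse (PySem.Str.strip x == "") xs := by
          simp only [pvCollapse]; rw [if_neg h]
        rw [hc]
        simp

theorem pv_trim_eq (lines : List String) :
    trim_extra_blank_lines lines = pvBack (pvFront (pvCollapse false lines)) := by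
  unfold trim_extra_blank_lines pvBack pvFront
  rw [pv_collapse_fold]
  simp

theorem pvLastNB_append (pre : List String) (x : String) :
    pvLastNB (pre ++ [x]) = if pvNB x then some x else pvLastNB pre := by
  simp only [pvLastNB, List.reverse_append, List.reverse_singleton, List.singleton_append,
    List.find?_cons]
  by_cases h : pvNB x = true <;> simp [h]

theorem pv_prev_eq (pre xs : List String) (x : String) :
    previous_nonblank (pre ++ x :: xs) (pre.length : Int) = pvLastNB pre := by
  unfold previous_nonblank pvLastNB
  rw [PySem.List.slice_to (pre ++ x :: xs) (by omega : (0:Int) ≤ (pre.length : Int))]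
  simp only [Int.toNat_natCast]
  rw [List.take_left]
  rfl

theorem pv_next_eq (pre xs : List String) (x : String) :
    next_nonblank (pre ++ x :: xs) (pre.length : Int) = pvFirstNB xs := by
  unfold next_nonblank pvFirstNB
  rw [PySem.List.slice_from (pre ++ x :: xs) (by omega : (0:Int) ≤ (pre.length : Int) + 1)]
  have h1 : ((pre.length : Int) + 1).toNat = (pre ++ [x]).length := by
    simp only [List.length_append, List.length_cons, List.length_nil]
    omega
  rw [List.append_cons pre x xs, h1, List.drop_left]
  rfl

theorem pv_loop_eq (suf : List String) : ∀ (pre acc : List String),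
    (PySem.List.enumerate suf (pre.length : Int)).foldl (fun acc p =>
      if PySem.Str.strip p.2 == "" then
        if (match previous_nonblank (pre ++ suf) p.1, next_nonblank (pre ++ suf) p.1 with
            | some pr, some nx =>
                pr != "" && nx != "" && line_type pr == "heading" && line_type nx == "table"
            | _, _ => false) then acc
        else acc ++ [p.2]
      else acc ++ [p.2]) acc = acc ++ pvDm (pvLastNB pre) suf := by
  induction suf with
  | nil => intro pre acc; simp [PySem.List.enumerate_nil, pvDm]
  | cons x xs ih =>
      intro pre acc
      rw [PySem.List.enumerate_cons, List.foldl_cons]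
      dsimp only
      rw [pv_prev_eq pre xs x, pv_next_eq pre xs x]
      have hmatch : (match pvLastNB pre, pvFirstNB xs with
          | some pr, some nx =>
              pr != "" && nx != "" && line_type pr == "heading" && line_type nx == "table"
          | _, _ => false) = pvCondA (pvLastNB pre) (pvFirstNB xs) := rfl
      rw [hmatch]
      have hcast : (pre.length : Int) + 1 = ((pre ++ [x]).length : Int) := by simp
      have hlist : pre ++ x :: xs = (pre ++ [x]) ++ xs := List.append_cons pre x xs
      by_cases hx : (PySem.Str.strip x == "") = true
      · have hnbx : pvNB x = false := by simp [pvNB]; simpa using hx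
        rw [if_pos hx]
        by_cases hc : pvCondA (pvLastNB pre) (pvFirstNB xs) = true
        · rw [if_pos hc, hcast, hlist, ih (pre ++ [x]) acc]
          rw [pvLastNB_append, if_neg (by simp [hnbx])]
          have hd : pvDm (pvLastNB pre) (x :: xs) = pvDm (pvLastNB pre) xs := by
            simp only [pvDm]; rw [if_pos hx, if_pos hc]
          rw [hd]
        · rw [if_neg hc, hcast, hlist, ih (pre ++ [x]) (acc ++ [x])]
          rw [pvLastNB_append, if_neg (by simp [hnbx])]
          have hd : pvDm (pvLastNB pre) (x :: xs) = x :: pvDm (pvLastNB pre) xs := by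
            simp only [pvDm]; rw [if_pos hx, if_neg hc]
          rw [hd]
          simp
      · rw [if_neg hx, hcast, hlist, ih (pre ++ [x]) (acc ++ [x])]
        rw [pvLastNB_append, if_pos (by simp [pvNB]; simpa using hx)]
        have hd : pvDm (pvLastNB pre) (x :: xs) = x :: pvDm (some x) xs := by
          simp only [pvDm]; rw [if_neg hx]
        rw [hd]
        simp

theorem pv_A_eq (slide_lines : List String) :
    merge_title_table_stack slide_lines
      = pvBack (pvFront (pvCollapse false (pvDm none slide_lines))) := by
  unfold merge_title_table_stack
  dsimp only
  have hl := pv_loop_eq slide_lines [] []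
  simp only [List.nil_append] at hl
  rw [show ((List.length ([] : List String) : Int)) = 0 from rfl] at hl
  rw [pv_trim_eq]
  exact congrArg (fun t => pvBack (pvFront (pvCollapse false t))) hl

theorem pv_bfold (l : List String) : ∀ (acc : List String) (prev : Option String),
    ((l.foldl (fun (st : List String × Option String × Option String) raw =>
      let merged := st.1
      let prev := st.2.1
      let pending := st.2.2
      if PySem.Str.strip raw != "" then
        let merged :=
          match pending, prev with
          | some p, some pr => if !(pv_is_heading pr && pv_is_table raw) then merged ++ [p] else merged
          | _, _ => merged
        (merged ++ [raw], some raw, none)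
      else
        match pending with
        | none => (merged, prev, some raw)
        | some _ => st) (acc, prev, none)).1 = acc ++ pvBc prev l)
    ∧ ∀ (b : String),
    ((l.foldl (fun (st : List String × Option String × Option String) raw =>
      let merged := st.1
      let prev := st.2.1
      let pending := st.2.2
      if PySem.Str.strip raw != "" then
        let merged :=
          match pending, prev with
          | some p, some pr => if !(pv_is_heading pr && pv_is_table raw) then merged ++ [p] else merged
          | _, _ => merged
        (merged ++ [raw], some raw, none)
      else
        match pending with
        | none => (merged, prev, some raw)
        | some _ => st) (acc, prev, some b)).1 = acc ++ pvBs prev b l) := by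
  induction l with
  | nil => intro acc prev; simp [pvBc, pvBs]
  | cons x xs ih =>
      intro acc prev
      constructor
      · rw [List.foldl_cons]
        dsimp only
        by_cases h : (PySem.Str.strip x != "") = true
        · rw [if_pos h, (ih _ _).1]
          simp only [pvBc]
          rw [if_pos h]
          simp
        · rw [if_neg h, (ih _ _).2]
          simp only [pvBc]
          rw [if_neg h]
      · intro b
        rw [List.foldl_cons]
        dsimp only
        by_cases h : (PySem.Str.strip x != "") = true
        · rw [if_pos h]
          cases prev with
          | none =>
              rw [(ih _ _).1]
              simp only [pvBs]
              rw [if_pos h]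
              simp
          | some pr =>
              dsimp only
              by_cases hk : (!(pv_is_heading pr && pv_is_table x)) = true
              · rw [if_pos hk, (ih _ _).1]
                simp only [pvBs]
                rw [if_pos h, if_pos hk]
                simp
              · rw [if_neg hk, (ih _ _).1]
                simp only [pvBs]
                rw [if_pos h, if_neg hk]
                simp
        · rw [if_neg h, (ih _ _).2]
          simp only [pvBs]
          rw [if_neg h]

theorem pv_B_eq (slide_lines : List String) :
    merge_title_table_stack_alt slide_lines = pvBc none slide_lines := by
  unfold merge_title_table_stack_alt
  rw [(pv_bfold slide_lines [] none).1]
  simp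

-- ---- the main joint induction ----

def pvPendA (p b : String) (xs : List String) : List String :=
  if pvCondA (some p) (pvFirstNB xs) then pvBack (pvCollapse false (pvDm (some p) xs))
  else if xs.any pvNB then b :: pvBack (pvCollapse true (pvDm (some p) xs))
  else []

theorem pv_main (xs : List String) :
    (∀ p, pvNB p = true → pvBack (pvCollapse false (pvDm (some p) xs)) = pvBc (some p) xs)
    ∧ (∀ p b, pvNB p = true → pvPendA p b xs = pvBs (some p) b xs)
    ∧ (pvFront (pvBack (pvCollapse false (pvDm none xs))) = pvBc none xs)
    ∧ (∀ b, pvFront (pvBack (pvCollapse true (pvDm none xs))) = pvBs none b xs) := by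
  induction xs with
  | nil =>
      refine ⟨fun p _ => rfl, fun p b _ => ?_, rfl, fun b => rfl⟩
      simp [pvPendA, pvCondA, pvFirstNB, pvBs]
  | cons x t ih =>
      obtain ⟨ih1, ih2, ih3, ih4⟩ := ih
      have hcnone : ∀ o, pvCondA none o = false := fun o => rfl
      by_cases hb : (PySem.Str.strip x == "") = true
      -- ===== x is blank =====
      · have hnb : pvNB x = false := by simp [pvNB]; simpa using hb
        have hne : (PySem.Str.strip x != "") = false := hnb
        have hf : pvFirstNB (x :: t) = pvFirstNB t := by
          simp [pvFirstNB, hnb]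
        have hcolT : ∀ L, pvCollapse true (x :: L) = pvCollapse true L := by
          intro L; simp [pvCollapse, hb]
        have hcolF : ∀ L, pvCollapse false (x :: L) = x :: pvCollapse true L := by
          intro L; simp [pvCollapse, hb]
        have hfrontB : ∀ L, pvFront (x :: L) = pvFront L := by
          intro L; simp [pvFront, hb]
        refine ⟨?_, ?_, ?_, ?_⟩
        -- G1
        · intro p hp
          have hRHS : pvBc (some p) (x :: t) = pvBs (some p) x t := by
            simp only [pvBc]; rw [if_neg (by simp [hne])]
          rw [hRHS, ← ih2 p x hp]
          by_cases hc : pvCondA (some p) (pvFirstNB t) = true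
          · have hdm : pvDm (some p) (x :: t) = pvDm (some p) t := by
              simp only [pvDm]; rw [if_pos hb, if_pos hc]
            rw [hdm, pvPendA, if_pos hc]
          · have hdm : pvDm (some p) (x :: t) = x :: pvDm (some p) t := by
              simp only [pvDm]; rw [if_pos hb, if_neg hc]
            rw [hdm, hcolF, pvBack_cons_blank x _ hnb, pvAny_collapse, pvAny_dm,
              pvPendA, if_neg hc]
        -- G2
        · intro p b hp
          have hstep : pvPendA p b (x :: t) = pvPendA p b t := by
            unfold pvPendA
            rw [hf]
            by_cases hc : pvCondA (some p) (pvFirstNB t) = true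
            · rw [if_pos hc, if_pos hc]
              have hdm : pvDm (some p) (x :: t) = pvDm (some p) t := by
                simp only [pvDm]; rw [if_pos hb, if_pos hc]
              rw [hdm]
            · rw [if_neg hc, if_neg hc]
              have hdm : pvDm (some p) (x :: t) = x :: pvDm (some p) t := by
                simp only [pvDm]; rw [if_pos hb, if_neg hc]
              rw [hdm, hcolT, List.any_cons, hnb]
              simp
          rw [hstep, ih2 p b hp]
          simp only [pvBs]
          rw [if_neg (by simp [hne])]
        -- G3
        · have hdm : pvDm none (x :: t) = x :: pvDm none t := by
            simp only [pvDm]; rw [if_pos hb, if_neg (by simp [hcnone])]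
          have hRHS : pvBc none (x :: t) = pvBs none x t := by
            simp only [pvBc]; rw [if_neg (by simp [hne])]
          rw [hdm, hcolF, pvBack_cons_blank x _ hnb, pvAny_collapse, pvAny_dm, hRHS]
          by_cases ha : t.any pvNB = true
          · rw [if_pos ha, hfrontB, ih4 x]
          · rw [if_neg (by simpa using ha), ← ih4 x,
              pvBack_eq_nil _ (by rw [pvAny_collapse, pvAny_dm]; simpa using ha)]
        -- G4
        · intro b
          have hdm : pvDm none (x :: t) = x :: pvDm none t := by
            simp only [pvDm]; rw [if_pos hb, if_neg (by simp [hcnone])]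
          have hRHS : pvBs none b (x :: t) = pvBs none b t := by
            simp only [pvBs]; rw [if_neg (by simp [hne])]
          rw [hdm, hcolT, ih4 b, hRHS]
      -- ===== x is non-blank =====
      · have hb' : (PySem.Str.strip x == "") = false := by simpa using hb
        have hnb : pvNB x = true := by unfold pvNB; simp [bne, hb']
        have hne : (PySem.Str.strip x != "") = true := hnb
        have hf : pvFirstNB (x :: t) = some x := by
          simp [pvFirstNB, hnb]
        have hdm : ∀ o, pvDm o (x :: t) = x :: pvDm (some x) t := by
          intro o; simp only [pvDm]; rw [if_neg (by simp [hb'])]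
        have hcolT : pvCollapse true (x :: pvDm (some x) t)
            = x :: pvCollapse false (pvDm (some x) t) := by
          simp [pvCollapse, hb']
        have hcolF : pvCollapse false (x :: pvDm (some x) t)
            = x :: pvCollapse false (pvDm (some x) t) := by
          simp [pvCollapse, hb']
        have hfrontN : ∀ L, pvFront (x :: L) = x :: L := by
          intro L; simp [pvFront, hb']
        refine ⟨?_, ?_, ?_, ?_⟩
        -- G1
        · intro p hp
          rw [hdm, hcolF, pvBack_cons_nonblank x _ hnb, ih1 x hnb]
          simp only [pvBc]
          rw [if_pos hne]
        -- G2
        · intro p b hp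
          have hc_eq : pvCondA (some p) (some x) = (pv_is_heading p && pv_is_table x) := by
            simp only [pvCondA]
            rw [pv_lt_heading p hp, pv_lt_table x hnb, pvNB_ne_empty p hp, pvNB_ne_empty x hnb]
            simp
          have hRHS : pvBs (some p) b (x :: t)
              = (if !(pv_is_heading p && pv_is_table x) then [b] else []) ++ x :: pvBc (some x) t := by
            simp only [pvBs]; rw [if_pos hne]
          rw [hRHS]
          unfold pvPendA
          rw [hf, hc_eq]
          by_cases hh : (pv_is_heading p && pv_is_table x) = true
          · rw [if_pos hh, hdm, hcolF, pvBack_cons_nonblank x _ hnb, ih1 x hnb]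
            rw [if_neg (by simp [hh])]
            rfl
          · rw [if_neg hh, if_pos (by simp [List.any_cons, hnb]),
              hdm, hcolT, pvBack_cons_nonblank x _ hnb, ih1 x hnb]
            rw [if_pos (by simp [Bool.eq_false_iff.mpr hh])]
            rfl
        -- G3
        · rw [hdm, hcolF, pvBack_cons_nonblank x _ hnb, hfrontN, ih1 x hnb]
          simp only [pvBc]
          rw [if_pos hne]
        -- G4
        · intro b
          rw [hdm, hcolT, pvBack_cons_nonblank x _ hnb, hfrontN, ih1 x hnb]
          simp only [pvBs]
          rw [if_pos hne]
          rfl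

-- ===== VERDICT (by name: the statement is the Claim_ definition above) =====
theorem merge_title_table_stack_spec : Claim_equal_merge_title_table_stack := by
  intro l _
  show merge_title_table_stack l = merge_title_table_stack_alt l
  rw [pv_A_eq, pv_B_eq, pvFrontBack_comm, (pv_main l).2.2.1]
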